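-- pv_equiv track=rewrite | github.com/Estebmaister/go_practice | interviews/turing/best_sum.py | best_sum_with_restrictions_rec
-- ===== SOURCE A (Python) =====
-- def best_sum_with_restrictions_rec(nums, res = 0):
--     if len(nums) == 0:
--         return res, []
--     # Remove duplicates and sort descending
--     nums = sorted(set(nums), reverse=True)
--
--     best_sum = [res for _ in nums]
--     best_combination = [[] for _ in nums]
--
--     # Try all numbers as candidates
--     counter = -1
--     for num in nums:
--         counter += 1
--         if num > best_sum[counter]:  # Ensure restriction is followed
--             # Recursion with updated sum
--             new_sum, new_combination = best_sum_with_restrictions_rec([n for n in nums if n>num], best_sum[counter] + num)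
--             if new_sum > best_sum[counter]:  # Update if a better sum is found
--                 best_sum[counter] = new_sum
--                 best_combination[counter] = [num] + new_combination
--
--     idx = best_sum.index(max(best_sum))
--     return best_sum[idx], best_combination[idx]
-- ===== SOURCE B (Python) =====
-- def best_sum_with_restrictions_rec(nums, res = 0):
--     # Include/exclude recursion over the distinct values in ASCENDING order:
--     # each value may be taken only if it exceeds the running sum; on a tie the
--     # skip branch (chain starting at a larger value) is kept, matching A's
--     # preference for larger starting numbers.
--     def chain(lst, s):
--         if not lst:
--             return s, []
--         x, rest = lst[0], lst[1:]
--         best = chain(rest, s)           # skip x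
--         if x > s:
--             ts, tc = chain(rest, s + x) # take x
--             if ts > best[0]:
--                 best = (ts, [x] + tc)
--         return best
--     return chain(sorted(set(nums)), res)
-- ===== Notes on version B (the rewrite author's own statement) =====
-- stated objective: simpler
-- what changed: A recursively tries every distinct value as the next chain element, re-sorting/deduplicating and building a filtered copy of the list at every recursive call and then picking the argmax slot of a mutated best_sum/best_combination pair of arrays; B sorts and deduplicates once and runs a single include/exclude recursion over the ascending distinct values carrying only the running sum, with skip-preferred ties reproducing A's tie-breaking exactly.
import Mathlib
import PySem

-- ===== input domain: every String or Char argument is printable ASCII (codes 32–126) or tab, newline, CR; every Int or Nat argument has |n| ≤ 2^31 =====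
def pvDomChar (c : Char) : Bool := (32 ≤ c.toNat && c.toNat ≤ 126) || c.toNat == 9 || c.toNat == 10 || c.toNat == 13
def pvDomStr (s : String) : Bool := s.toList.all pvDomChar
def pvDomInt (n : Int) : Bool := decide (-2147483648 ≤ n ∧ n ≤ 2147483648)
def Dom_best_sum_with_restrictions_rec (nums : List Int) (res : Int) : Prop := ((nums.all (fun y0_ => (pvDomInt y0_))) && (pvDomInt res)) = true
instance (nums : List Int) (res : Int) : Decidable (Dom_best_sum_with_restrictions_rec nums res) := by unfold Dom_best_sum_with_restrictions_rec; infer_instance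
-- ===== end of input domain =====

-- B replaces A's per-level scan over every starting candidate (with a fresh sort/dedup and
-- filtered copy at each recursive call) by one include/exclude recursion over the distinct
-- values in ascending order, sorting once; objective: a simpler, structurally different
-- exact re-implementation (same return value, including tie-breaking).

-- ===== PORT A =====
-- Fuel-based transliteration of A. nums.length + 1 fuel always suffices: each recursive
-- call's argument is a strict subset of the distinct elements, so its length strictly
-- decreases; the fuel-0 branch is never reached.
def best_sum_aux : Nat → List Int → Int → Int × List Int
  | 0, _, res => (res, [])
  | f+1, nums, res =>
    if nums.isEmpty then (res, [])           -- if len(nums) == 0: return res, []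
    else
      -- nums = sorted(set(nums), reverse=True)
      let d := PySem.List.sorted (PySem.Set.ofList nums) (fun x => x) true
      -- best_sum / best_combination lists, the counter loop mutating them in place
      let st := d.foldl (fun (st : List Int × List (List Int) × Int) num =>
          let counter := st.2.2 + 1
          let cur := PySem.List.pyGetD st.1 counter 0     -- best_sum[counter]; counter is always in range
          if num > cur then
            let pr := best_sum_aux f (d.filter (fun n => decide (n > num))) (cur + num)
            if pr.1 > cur then
              (PySem.List.pySetD st.1 counter pr.1, PySem.List.pySetD st.2.1 counter (num :: pr.2), counter)
            else (st.1, st.2.1, counter)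
          else (st.1, st.2.1, counter))
        (d.map (fun _ => res), d.map (fun _ => ([] : List Int)), (-1 : Int))
      -- idx = best_sum.index(max(best_sum)); best_sum nonempty here, idx in range
      let m := (PySem.List.max? st.1 (fun y => y)).getD 0
      let idx : Nat := (PySem.List.index? st.1 m).getD 0
      (st.1.getD idx 0, st.2.1.getD idx [])

def best_sum_with_restrictions_rec (nums : List Int) (res : Int) : Int × List Int :=
  best_sum_aux (nums.length + 1) nums res

-- ===== PORT B =====
-- chain(lst, s) from Source B: include/exclude recursion over the ascending distinct values.
def chain_b : List Int → Int → Int × List Int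
  | [], s => (s, [])
  | x :: rest, s =>
    let best := chain_b rest s
    if x > s then
      let t := chain_b rest (s + x)
      if t.1 > best.1 then (t.1, x :: t.2) else best
    else best

def best_sum_with_restrictions_rec_alt (nums : List Int) (res : Int) : Int × List Int :=
  chain_b (PySem.List.sorted (PySem.Set.ofList nums) (fun x => x) false) res

-- ===== PRECONDITION & SPEC =====
def Spec_best_sum_with_restrictions_rec (nums : List Int) (res : Int) (out : Int × List Int) : Prop := out = best_sum_with_restrictions_rec_alt nums res
instance (nums : List Int) (res : Int) (out : Int × List Int) : Decidable (Spec_best_sum_with_restrictions_rec nums res out) := by unfold Spec_best_sum_with_restrictions_rec; infer_instance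

-- ===== CLAIM (what is proved, stated in full; the proofs are below) =====
def Claim_equal_best_sum_with_restrictions_rec : Prop := ∀ (nums : List Int) (res : Int), Dom_best_sum_with_restrictions_rec nums res → Spec_best_sum_with_restrictions_rec nums res (best_sum_with_restrictions_rec nums res)

-- ===== LEMMAS AND PROOFS =====

-- The loop body of A's fold, named for the proofs (definitionally the lambda in best_sum_aux).
def stepA (f : Nat) (d : List Int) (st : List Int × List (List Int) × Int) (num : Int) :
    List Int × List (List Int) × Int :=
  let counter := st.2.2 + 1
  let cur := PySem.List.pyGetD st.1 counter 0
  if num > cur then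
    let pr := best_sum_aux f (d.filter (fun n => decide (n > num))) (cur + num)
    if pr.1 > cur then
      (PySem.List.pySetD st.1 counter pr.1, PySem.List.pySetD st.2.1 counter (num :: pr.2), counter)
    else (st.1, st.2.1, counter)
  else (st.1, st.2.1, counter)

-- The entry A's loop computes at the slot of candidate num (best_sum/best_combination value).
def entryA (f : Nat) (d : List Int) (s num : Int) : Int × List Int :=
  if num > s then
    let pr := best_sum_aux f (d.filter (fun n => decide (n > num))) (s + num)
    if pr.1 > s then (pr.1, num :: pr.2) else (s, [])
  else (s, [])

-- A's final selection: value and combination at the first index of the maximal sum.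
def selA (bs : List Int) (bc : List (List Int)) : Int × List Int :=
  let m := (PySem.List.max? bs (fun y => y)).getD 0
  let idx : Nat := (PySem.List.index? bs m).getD 0
  (bs.getD idx 0, bc.getD idx [])

-- "first maximum, strict improvement" fold.
def fmaxB (b : Int × List Int) (l : List (Int × List Int)) : Int × List Int :=
  l.foldl (fun b e => if e.1 > b.1 then e else b) b

-- A's body after the empty test and the sort (definitionally the rest of best_sum_aux).
def bodyA (f : Nat) (d : List Int) (s : Int) : Int × List Int :=
  let st := d.foldl (stepA f d) (d.map (fun _ => s), d.map (fun _ => ([] : List Int)), (-1 : Int))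
  selA st.1 st.2.1

theorem best_sum_aux_succ (f : Nat) (nums : List Int) (res : Int) :
    best_sum_aux (f+1) nums res =
      if nums.isEmpty then (res, [])
      else bodyA f (PySem.List.sorted (PySem.Set.ofList nums) (fun x => x) true) res := rfl

theorem foldl_add_length_le (xs : List Int) : ∀ (s : List Int),
    (xs.foldl PySem.Set.add s).length ≤ s.length + xs.length := by
  induction xs with
  | nil => simp
  | cons x t ih =>
    intro s
    simp only [List.foldl_cons]
    refine le_trans (ih _) ?_
    unfold PySem.Set.add
    split
    · simp
    · simp; omega

theorem ofList_length_le (xs : List Int) : (PySem.Set.ofList xs).length ≤ xs.length := by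
  have := foldl_add_length_le xs PySem.Set.empty
  simpa [PySem.Set.ofList, PySem.Set.empty] using this

theorem foldl_add_eq_append (xs : List Int) : ∀ (s : List Int), (s ++ xs).Nodup →
    xs.foldl PySem.Set.add s = s ++ xs := by
  induction xs with
  | nil => simp
  | cons x t ih =>
    intro s h
    have hx : x ∉ s := by
      intro hm
      exact (List.nodup_append.mp h).2.2 x hm x (by simp) rfl
    have hadd : PySem.Set.add s x = s ++ [x] := by
      unfold PySem.Set.add PySem.Set.contains
      rw [if_neg]
      simp only [List.contains_eq_mem, decide_eq_true_eq]
      exact hx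
    simp only [List.foldl_cons, hadd]
    rw [ih (s ++ [x]) (by simpa using h)]
    simp

theorem ofList_eq_self_of_nodup (xs : List Int) (h : xs.Nodup) : PySem.Set.ofList xs = xs := by
  have := foldl_add_eq_append xs [] (by simpa using h)
  simpa [PySem.Set.ofList, PySem.Set.empty] using this

theorem ofList_ne_nil (xs : List Int) (h : xs ≠ []) : PySem.Set.ofList xs ≠ [] := by
  obtain ⟨y, t, rfl⟩ := List.exists_cons_of_ne_nil h
  intro hnil
  have : y ∈ PySem.List.dedup (y :: t) := (PySem.List.mem_dedup _ _).mpr (by simp)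
  rw [PySem.List.dedup_eq_ofList] at this
  simp [hnil] at this

theorem dsort_desc (d : List Int) (h : List.Pairwise (fun a b => b < a) d) :
    PySem.List.sorted (PySem.Set.ofList d) (fun x => x) true = d := by
  have hnd : d.Nodup := h.imp (fun hab => (ne_of_lt hab).symm)
  rw [ofList_eq_self_of_nodup d hnd]
  exact PySem.List.sorted_rev_eq_self_of_pairwise d _ (h.imp le_of_lt)

theorem chain_fst_ge (a : List Int) : ∀ (s : Int), s ≤ (chain_b a s).1 := by
  induction a with
  | nil => intro s; simp [chain_b]
  | cons x rest ih =>
    intro s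
    simp only [chain_b]
    split
    · split
      · next h1 h2 => exact le_trans (ih s) (le_of_lt h2)
      · exact ih s
    · exact ih s

-- A's fold characterized: it fills slot i with entryA applied to d[i].
theorem foldA (f : Nat) (d : List Int) (s : Int) :
    ∀ (t p : List Int), d = p ++ t →
    t.foldl (stepA f d)
      (p.map (fun u => (entryA f d s u).1) ++ t.map (fun _ => s),
       p.map (fun u => (entryA f d s u).2) ++ t.map (fun _ => ([] : List Int)),
       (p.length : Int) - 1)
    = (d.map (fun u => (entryA f d s u).1), d.map (fun u => (entryA f d s u).2),
       (d.length : Int) - 1) := by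
  intro t
  induction t with
  | nil =>
    intro p hd
    subst hd
    simp
  | cons num t' ih =>
    intro p hd
    simp only [List.map_cons, List.foldl_cons]
    have hidx : ((p.length : Int) - 1 + 1)
        = ((p.map (fun u => (entryA f d s u).1)).length : Int) := by simp
    have hidx2 : ((p.length : Int) - 1 + 1)
        = ((p.map (fun u => (entryA f d s u).2)).length : Int) := by simp
    have hstep : stepA f d
        (p.map (fun u => (entryA f d s u).1) ++ s :: t'.map (fun _ => s),
         p.map (fun u => (entryA f d s u).2) ++ ([] : List Int) :: t'.map (fun _ => ([] : List Int)),
         (p.length : Int) - 1) num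
      = (p.map (fun u => (entryA f d s u).1) ++ (entryA f d s num).1 :: t'.map (fun _ => s),
         p.map (fun u => (entryA f d s u).2) ++ (entryA f d s num).2 :: t'.map (fun _ => ([] : List Int)),
         (p.length : Int)) := by
      simp only [stepA]
      rw [hidx, PySem.List.pyGetD_natCast]
      simp only [List.getD_eq_getElem?_getD, List.getElem?_append_right (le_refl _),
        Nat.sub_self, List.getElem?_cons_zero, Option.getD_some]
      by_cases h1 : num > s
      · rw [if_pos h1]
        by_cases h2 : (best_sum_aux f (d.filter (fun n => decide (n > num))) (s + num)).1 > s
        · rw [if_pos h2]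
          have hE : entryA f d s num
              = ((best_sum_aux f (d.filter (fun n => decide (n > num))) (s + num)).1,
                 num :: (best_sum_aux f (d.filter (fun n => decide (n > num))) (s + num)).2) := by
            simp [entryA, h1, h2]
          rw [PySem.List.pySetD_natCast, PySem.List.pySetD_natCast]
          simp [hE]
        · rw [if_neg h2]
          have hE : entryA f d s num = (s, []) := by simp [entryA, h1, h2]
          rw [hE]
          simp
      · rw [if_neg h1]
        have hE : entryA f d s num = (s, []) := by simp [entryA, h1]
        rw [hE]
        simp
    rw [hstep]
    have hmain := ih (p ++ [num]) (by rw [hd, List.append_assoc]; rfl)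
    simp only [List.map_append, List.map_cons, List.map_nil, List.length_append,
      List.length_cons, List.length_nil, List.append_assoc, List.cons_append,
      List.nil_append] at hmain
    have hcast : ((p.length + (0 + 1) : Nat) : Int) - 1 = (p.length : Int) := by push_cast; ring
    rw [hcast] at hmain
    exact hmain

theorem sel_cons_lt (e y : Int × List Int) (t : List (Int × List Int)) (h : e.1 < y.1) :
    selA ((e :: y :: t).map Prod.fst) ((e :: y :: t).map Prod.snd)
      = selA ((y :: t).map Prod.fst) ((y :: t).map Prod.snd) := by
  simp only [List.map_cons]
  unfold selA
  rw [PySem.List.max?_id_cons, PySem.List.max?_id_cons]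
  have hm : (y.1 :: t.map Prod.fst).foldl max e.1 = (t.map Prod.fst).foldl max y.1 := by
    simp [max_eq_right h.le]
  rw [hm]
  have hym : y.1 ≤ (t.map Prod.fst).foldl max y.1 := (PySem.List.le_foldl_max _ _).1
  have hne : e.1 ≠ (t.map Prod.fst).foldl max y.1 := ne_of_lt (lt_of_lt_of_le h hym)
  have hmem : (t.map Prod.fst).foldl max y.1 ∈ y.1 :: t.map Prod.fst := by
    rcases PySem.List.foldl_max_mem (t.map Prod.fst) y.1 with h1 | h1
    · rw [h1]; exact List.mem_cons_self
    · exact List.mem_cons_of_mem _ h1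
  obtain ⟨k, hk⟩ := Option.isSome_iff_exists.mp
    ((PySem.List.index?_isSome_iff _ _).mpr hmem)
  simp only [Option.getD_some]
  rw [PySem.List.index?_cons_of_ne _ hne, hk]
  simp

theorem sel_cons_ge (e y : Int × List Int) (t : List (Int × List Int)) (h : y.1 ≤ e.1) :
    selA ((e :: y :: t).map Prod.fst) ((e :: y :: t).map Prod.snd)
      = selA ((e :: t).map Prod.fst) ((e :: t).map Prod.snd) := by
  simp only [List.map_cons]
  unfold selA
  rw [PySem.List.max?_id_cons, PySem.List.max?_id_cons]
  have hm : (y.1 :: t.map Prod.fst).foldl max e.1 = (t.map Prod.fst).foldl max e.1 := by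
    simp [max_eq_left h]
  rw [hm]
  simp only [Option.getD_some]
  by_cases he : e.1 = (t.map Prod.fst).foldl max e.1
  · rw [← he, PySem.List.index?_cons_self, PySem.List.index?_cons_self]
    simp
  · have hle : e.1 ≤ (t.map Prod.fst).foldl max e.1 := (PySem.List.le_foldl_max _ _).1
    have hlt : e.1 < (t.map Prod.fst).foldl max e.1 := lt_of_le_of_ne hle he
    have hny : y.1 ≠ (t.map Prod.fst).foldl max e.1 := ne_of_lt (lt_of_le_of_lt h hlt)
    have hmem : (t.map Prod.fst).foldl max e.1 ∈ t.map Prod.fst := by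
      rcases PySem.List.foldl_max_mem (t.map Prod.fst) e.1 with h1 | h1
      · exact absurd h1.symm he
      · exact h1
    obtain ⟨k, hk⟩ := Option.isSome_iff_exists.mp
      ((PySem.List.index?_isSome_iff _ _).mpr hmem)
    rw [PySem.List.index?_cons_of_ne _ he, PySem.List.index?_cons_of_ne _ hny,
      PySem.List.index?_cons_of_ne _ he, hk]
    simp

theorem sel_eq_fmax (es : List (Int × List Int)) : ∀ (e : Int × List Int),
    selA ((e :: es).map Prod.fst) ((e :: es).map Prod.snd) = fmaxB e es := by
  induction es with
  | nil =>
    intro e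
    simp [selA, fmaxB, PySem.List.max?_id_cons]
  | cons y t ih =>
    intro e
    by_cases h : y.1 > e.1
    · rw [sel_cons_lt e y t h, ih y]
      simp [fmaxB, if_pos h]
    · rw [sel_cons_ge e y t (not_lt.mp h), ih e]
      simp [fmaxB, if_neg h]

theorem fmax_append (e x : Int × List Int) (l : List (Int × List Int)) :
    fmaxB e (l ++ [x]) = if x.1 > (fmaxB e l).1 then x else fmaxB e l := by
  simp [fmaxB, List.foldl_append]

theorem bodyA_sel (f : Nat) (d : List Int) (s : Int) :
    bodyA f d s = selA ((d.map (entryA f d s)).map Prod.fst) ((d.map (entryA f d s)).map Prod.snd) := by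
  have h := foldA f d s d [] rfl
  simp only [List.map_nil, List.nil_append, List.length_nil, Nat.cast_zero, zero_sub] at h
  show selA (List.foldl (stepA f d) (d.map (fun _ => s), d.map (fun _ => ([] : List Int)), (-1 : Int)) d).1
        (List.foldl (stepA f d) (d.map (fun _ => s), d.map (fun _ => ([] : List Int)), (-1 : Int)) d).2.1
      = _
  rw [h]
  simp only [List.map_map]
  rfl

-- The heart: on a strictly ascending list a, A's body on a.reverse is B's recursion on a.
theorem core (a : List Int) : ∀ (f : Nat) (s : Int), List.Pairwise (· < ·) a → a ≠ [] →
    a.length ≤ f → bodyA f a.reverse s = chain_b a s := by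
  induction a with
  | nil => intro f s _ hne _; exact absurd rfl hne
  | cons x a' ih =>
    intro f s hp hne hlen
    obtain ⟨hpx, hp'⟩ := List.pairwise_cons.mp hp
    have hrev : (x :: a').reverse = a'.reverse ++ [x] := by simp
    rw [show bodyA f ((x :: a').reverse) s = bodyA f (a'.reverse ++ [x]) s from by rw [hrev]]
    rw [bodyA_sel]
    have hfiltx : (a'.reverse ++ [x]).filter (fun n => decide (n > x)) = a'.reverse := by
      rw [List.filter_append]
      have h2 : a'.reverse.filter (fun n => decide (n > x)) = a'.reverse :=
        List.filter_eq_self.mpr (fun b hb => by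
          simp only [decide_eq_true_eq, gt_iff_lt]
          exact hpx b (List.mem_reverse.mp hb))
      simp [h2]
    have hfilt2 : ∀ num ∈ a', (a'.reverse ++ [x]).filter (fun n => decide (n > num))
        = a'.reverse.filter (fun n => decide (n > num)) := by
      intro num hnum
      rw [List.filter_append]
      have hxn : (decide (x > num)) = false := by
        simp only [decide_eq_false_iff_not, gt_iff_lt, not_lt]
        exact le_of_lt (hpx num hnum)
      simp [hxn]
    obtain ⟨f', rfl⟩ : ∃ f', f = f' + 1 := ⟨f - 1, by simp at hlen; omega⟩
    have hmapE : (a'.reverse).map (entryA (f'+1) (a'.reverse ++ [x]) s)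
        = (a'.reverse).map (entryA (f'+1) a'.reverse s) := by
      apply List.map_congr_left
      intro num hnum
      unfold entryA
      rw [hfilt2 num (List.mem_reverse.mp hnum)]
    have hprA : best_sum_aux (f'+1) a'.reverse (s + x) = chain_b a' (s + x) := by
      cases ha : a' with
      | nil => simp [best_sum_aux, chain_b]
      | cons y t =>
        have hane : a' ≠ [] := by simp [ha]
        rw [← ha]
        have hgt : (a'.reverse).Pairwise (fun a b => b < a) :=
          List.pairwise_reverse.mpr hp'
        rw [best_sum_aux_succ, if_neg (by simp [ha]), dsort_desc _ hgt]
        exact ih f' (s + x) hp' hane (by simp at hlen; omega)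
    have hEx : entryA (f'+1) (a'.reverse ++ [x]) s x
        = if x > s then
            (if (chain_b a' (s+x)).1 > s then ((chain_b a' (s+x)).1, x :: (chain_b a' (s+x)).2)
             else (s, []))
          else (s, []) := by
      unfold entryA
      rw [hfiltx, hprA]
    rw [List.map_append, hmapE]
    simp only [List.map_cons, List.map_nil]
    cases ha : a' with
    | nil =>
      subst ha
      simp only [List.reverse_nil, List.nil_append, List.map_nil, List.map_cons] at hEx ⊢
      have hsel := sel_eq_fmax [] (entryA (f'+1) [x] s x)
      simp only [List.map_cons, List.map_nil] at hsel
      rw [hsel]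
      simp only [fmaxB, List.foldl_nil]
      rw [hEx]
      simp only [chain_b]
    | cons y t =>
      rw [← ha]
      have hLne : a'.reverse.map (entryA (f'+1) a'.reverse s) ≠ [] := by simp [ha]
      obtain ⟨e0, L', hL⟩ := List.exists_cons_of_ne_nil hLne
      rw [hL]
      have hform : (e0 :: L') ++ [entryA (f'+1) (a'.reverse ++ [x]) s x]
          = e0 :: (L' ++ [entryA (f'+1) (a'.reverse ++ [x]) s x]) := rfl
      rw [hform]
      rw [sel_eq_fmax, fmax_append]
      have hbest : fmaxB e0 L' = chain_b a' s := by
        rw [← sel_eq_fmax, ← hL, ← bodyA_sel]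
        exact ih (f'+1) s hp' (by simp [ha]) (by simp at hlen; omega)
      rw [hbest, hEx]
      have hb := chain_fst_ge a' s
      simp only [chain_b]
      by_cases h1 : x > s
      · by_cases h2 : (chain_b a' (s+x)).1 > s
        · simp only [if_pos h1, if_pos h2]
        · have h3 : ¬ (chain_b a' (s+x)).1 > (chain_b a' s).1 := by omega
          simp only [if_pos h1, if_neg h2, if_neg h3]
          have h4 : ¬ ((s : Int), ([] : List Int)).1 > (chain_b a' s).1 := by simp; omega
          simp only [if_neg h4]
      · have h4 : ¬ ((s : Int), ([] : List Int)).1 > (chain_b a' s).1 := by simp; omega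
        simp only [if_neg h1, if_neg h4]

-- ===== VERDICT (by name: the statement is the Claim_ definition above) =====
theorem best_sum_with_restrictions_rec_spec : Claim_equal_best_sum_with_restrictions_rec := by
  unfold Claim_equal_best_sum_with_restrictions_rec
  intro nums res _
  unfold Spec_best_sum_with_restrictions_rec best_sum_with_restrictions_rec best_sum_with_restrictions_rec_alt
  by_cases hn : nums = []
  · subst hn
    show best_sum_aux 1 [] res = _
    rw [show PySem.List.sorted (PySem.Set.ofList ([] : List Int)) (fun x => x) false = [] from rfl]
    simp [best_sum_aux, chain_b]
  · rw [best_sum_aux_succ, if_neg (by simp [hn])]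
    have hpa : List.Pairwise (· < ·) (PySem.List.sorted (PySem.Set.ofList nums) (fun x => x) false) :=
      PySem.List.sorted_ofList_pairwise_lt nums
    have hane : PySem.List.sorted (PySem.Set.ofList nums) (fun x => x) false ≠ [] := by
      intro h0
      exact ofList_ne_nil nums hn ((PySem.List.sorted_eq_nil_iff _ _ _).mp h0)
    have hlen : (PySem.List.sorted (PySem.Set.ofList nums) (fun x => x) false).length ≤ nums.length := by
      rw [List.Perm.length_eq (PySem.List.sorted_perm _ _ _)]
      exact ofList_length_le nums
    have hrev : PySem.List.sorted (PySem.Set.ofList nums) (fun x => x) true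
        = (PySem.List.sorted (PySem.Set.ofList nums) (fun x => x) false).reverse := by
      apply PySem.List.sorted_rev_eq_of_perm_of_pairwise_gt
      · exact (List.reverse_perm _).trans (PySem.List.sorted_perm _ _ _)
      · exact List.pairwise_reverse.mpr hpa
    rw [hrev]
    exact core _ nums.length res hpa hane hlen
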